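-- pv_equiv track=rewrite | github.com/wuyaxv/lil-code | DP/502.py | findMaximizedCapital
-- ===== SOURCE A (Python) =====
-- from typing import List
--
-- def findMaximizedCapital(k: int, w: int, profits: List[int], capital: List[int]) -> int:
--     n = len(profits)
--
--     dp = [w for _ in range(k+1)]
--
--     items = list(zip(profits, capital))
--     items.sort(key=lambda k: k[1]) # 对capital进行排序
--
--     for i in range(n):
--         for j in range(k, 0, -1):
--             if dp[j-1] >= items[i][1]: # 可以投
--                 dp[j] = max(dp[j], dp[j-1]+items[i][0]) # 判断投还是不投
--     return dp[-1]
-- ===== SOURCE B (Python) =====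
-- def findMaximizedCapital(k, w, profits, capital):
--     projects = sorted(zip(capital, profits), key=lambda cp: cp[0])
--     n = len(projects)
--     avail = []
--     i = 0
--     for _ in range(k):
--         while i < n and projects[i][0] <= w:
--             avail.append(projects[i][1])
--             i += 1
--         best = max(avail, default=0)
--         if best <= 0:
--             break
--         avail.remove(best)
--         w += best
--     return w
-- ===== Notes on version B (the rewrite author's own statement) =====
-- stated objective: faster
-- what changed: Replaced the O(n*k) knapsack-style DP array (for every project, update all k slots) by the classic IPO greedy: sort projects by capital once, keep a pool of affordable profits, and repeatedly take the largest affordable profit until k picks are made or no positive profit is affordable.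
import Mathlib
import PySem

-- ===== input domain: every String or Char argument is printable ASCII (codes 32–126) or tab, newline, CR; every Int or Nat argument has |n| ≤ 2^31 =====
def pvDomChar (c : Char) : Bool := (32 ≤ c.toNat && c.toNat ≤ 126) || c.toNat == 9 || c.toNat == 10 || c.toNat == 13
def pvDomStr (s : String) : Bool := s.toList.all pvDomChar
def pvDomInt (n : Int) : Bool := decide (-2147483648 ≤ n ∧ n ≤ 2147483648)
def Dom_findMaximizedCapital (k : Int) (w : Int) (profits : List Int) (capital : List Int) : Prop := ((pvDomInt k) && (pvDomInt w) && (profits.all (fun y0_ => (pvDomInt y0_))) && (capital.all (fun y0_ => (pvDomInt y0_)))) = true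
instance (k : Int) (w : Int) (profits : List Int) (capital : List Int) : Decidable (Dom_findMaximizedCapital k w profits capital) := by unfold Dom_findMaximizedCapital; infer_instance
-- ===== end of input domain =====

-- B replaces A's O(n*k) knapsack-style DP by the standard IPO greedy (sort by capital,
-- repeatedly take the largest affordable positive profit); return values proved equal on Pre_.

-- ===== PORT A =====
def findMaximizedCapital (k : Int) (w : Int) (profits : List Int) (capital : List Int) : Int :=
  let n : Int := (profits.length : Int)
  let dp : List Int := (PySem.List.pyRange 0 (k+1) 1).map (fun _ => w)
  let items : List (Int × Int) := profits.zip capital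
  let items : List (Int × Int) := PySem.List.sorted items (fun it => it.2)
  let dp : List Int := (PySem.List.pyRange 0 n 1).foldl (fun dp i =>
      (PySem.List.pyRange k 0 (-1)).foldl (fun dp j =>
        let it := PySem.List.pyGetD items i (0, 0)
        if PySem.List.pyGetD dp (j-1) 0 ≥ it.2 then
          PySem.List.pySetD dp j (max (PySem.List.pyGetD dp j 0) (PySem.List.pyGetD dp (j-1) 0 + it.1))
        else dp) dp) dp
  (PySem.List.pyGet? dp (-1)).getD 0

-- ===== PORT B =====
-- while i < n and projects[i][0] <= w: avail.append(projects[i][1]); i += 1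
def pvRefill (projects : List (Int × Int)) (w : Int) (i : Nat) (avail : List Int) : Nat × List Int :=
  match h : projects[i]? with
  | some cp => if cp.1 ≤ w then pvRefill projects w (i+1) (avail ++ [cp.2]) else (i, avail)
  | none => (i, avail)
termination_by projects.length - i
decreasing_by
  have hi : i < projects.length := by
    by_contra hc
    rw [List.getElem?_eq_none (by omega : projects.length ≤ i)] at h
    simp at h
  omega

-- for _ in range(k): refill; best = max(avail, default=0); if best <= 0: break; avail.remove(best); w += best
def pvLoopB (projects : List (Int × Int)) : Nat → Int → Nat → List Int → Int
  | 0, w, _, _ => w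
  | f+1, w, i, avail =>
    let r := pvRefill projects w i avail
    let best := PySem.List.maxD r.2 (fun x => x) 0
    if best ≤ 0 then w
    else pvLoopB projects f (w + best) r.1 ((PySem.List.remove? r.2 best).getD r.2)

def findMaximizedCapital_alt (k : Int) (w : Int) (profits : List Int) (capital : List Int) : Int :=
  let projects : List (Int × Int) := PySem.List.sorted (capital.zip profits) (fun cp => cp.1)
  pvLoopB projects k.toNat w 0 []

-- ===== PRECONDITION & SPEC =====
-- Pre_ excludes exactly the inputs where A raises IndexError: k < 0 (dp[-1] on an empty dp),
-- and k ≥ 1 with len(profits) > len(capital) (items[i] past the zip-truncated list).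
def Pre_findMaximizedCapital (k : Int) (w : Int) (profits : List Int) (capital : List Int) : Prop :=
  0 ≤ k ∧ (profits.length ≤ capital.length ∨ k = 0)
instance (k : Int) (w : Int) (profits : List Int) (capital : List Int) : Decidable (Pre_findMaximizedCapital k w profits capital) := by unfold Pre_findMaximizedCapital; infer_instance

def pvWitness_findMaximizedCapital : Int × Int × List Int × List Int := (2, 0, [1, 2, 3], [0, 1, 1])

def Spec_findMaximizedCapital (k : Int) (w : Int) (profits : List Int) (capital : List Int) (out : Int) : Prop := out = findMaximizedCapital_alt k w profits capital
instance (k : Int) (w : Int) (profits : List Int) (capital : List Int) (out : Int) : Decidable (Spec_findMaximizedCapital k w profits capital out) := by unfold Spec_findMaximizedCapital; infer_instance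

-- ===== CLAIM (what is proved, stated in full; the proofs are below) =====
def Claim_equal_findMaximizedCapital : Prop := ∀ (k : Int) (w : Int) (profits : List Int) (capital : List Int), Dom_findMaximizedCapital k w profits capital → Pre_findMaximizedCapital k w profits capital → Spec_findMaximizedCapital k w profits capital (findMaximizedCapital k w profits capital)

-- ===== LEMMAS AND PROOFS =====

-- The common mathematical value: the maximum final capital over all order-respecting
-- selections of at most kk projects from L (projects as (capital, profit) pairs) that are
-- affordable in sequence starting from capital w.
def pvPsum (s : List (Int × Int)) : Int := (s.map (·.2)).sum

def pvFeas (v : Int) : List (Int × Int) → Bool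
  | [] => true
  | x :: t => decide (x.1 ≤ v) && pvFeas (v + x.2) t

def pvM (kk : Nat) (w : Int) (L : List (Int × Int)) : Int :=
  ((L.sublists.filter (fun s => decide (s.length ≤ kk) && pvFeas w s)).map (fun s => w + pvPsum s)).foldl max w

@[simp] theorem pvPsum_nil : pvPsum [] = 0 := rfl
@[simp] theorem pvPsum_cons (x : Int × Int) (s : List (Int × Int)) : pvPsum (x :: s) = x.2 + pvPsum s := by
  simp [pvPsum]
@[simp] theorem pvPsum_append (s t : List (Int × Int)) : pvPsum (s ++ t) = pvPsum s + pvPsum t := by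
  simp [pvPsum]

-- generic foldl-max upper bound
theorem pvFoldlMax_le (l : List Int) (b : Int) : ∀ (init : Int), init ≤ b → (∀ x ∈ l, x ≤ b) → l.foldl max init ≤ b := by
  induction l with
  | nil => intro init h _; simpa using h
  | cons x t ih =>
    intro init h hall
    exact ih _ (max_le h (hall x (by simp))) (fun y hy => hall y (by simp [hy]))

theorem le_pvM (kk : Nat) (w : Int) (L : List (Int × Int)) : w ≤ pvM kk w L :=
  (PySem.List.le_foldl_max _ _).1

theorem pvM_ge (kk : Nat) (w : Int) (L : List (Int × Int)) (s : List (Int × Int))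
    (hs : s.Sublist L) (hlen : s.length ≤ kk) (hf : pvFeas w s = true) :
    w + pvPsum s ≤ pvM kk w L := by
  apply (PySem.List.le_foldl_max _ _).2
  exact List.mem_map.2 ⟨s, List.mem_filter.2 ⟨List.mem_sublists.2 hs, by simp [hlen, hf]⟩, rfl⟩

theorem pvM_le (kk : Nat) (w : Int) (L : List (Int × Int)) (b : Int)
    (hw : w ≤ b)
    (h : ∀ s, s.Sublist L → s.length ≤ kk → pvFeas w s = true → w + pvPsum s ≤ b) :
    pvM kk w L ≤ b := by
  apply pvFoldlMax_le _ _ _ hw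
  intro x hx
  obtain ⟨s, hs, rfl⟩ := List.mem_map.1 hx
  obtain ⟨hsub, hcond⟩ := List.mem_filter.1 hs
  simp only [Bool.and_eq_true, decide_eq_true_eq] at hcond
  exact h s (List.mem_sublists.1 hsub) hcond.1 hcond.2

theorem pvM_exists (kk : Nat) (w : Int) (L : List (Int × Int)) :
    ∃ s, s.Sublist L ∧ s.length ≤ kk ∧ pvFeas w s = true ∧ pvM kk w L = w + pvPsum s := by
  rcases PySem.List.foldl_max_mem ((L.sublists.filter (fun s => decide (s.length ≤ kk) && pvFeas w s)).map (fun s => w + pvPsum s)) w with h | h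
  · refine ⟨[], List.nil_sublist L, by simp, rfl, ?_⟩
    show pvM kk w L = w + pvPsum []
    rw [pvPsum_nil, add_zero]
    exact h
  · obtain ⟨s, hs, hv⟩ := List.mem_map.1 h
    obtain ⟨hsub, hcond⟩ := List.mem_filter.1 hs
    simp only [Bool.and_eq_true, decide_eq_true_eq] at hcond
    exact ⟨s, List.mem_sublists.1 hsub, hcond.1, hcond.2, hv.symm⟩

theorem pvFeas_append (s t : List (Int × Int)) : ∀ v, pvFeas v (s ++ t) = (pvFeas v s && pvFeas (v + pvPsum s) t) := by
  induction s with
  | nil => intro v; simp [pvFeas]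
  | cons x s ih =>
    intro v
    simp [pvFeas, ih (v + x.2), Bool.and_assoc, add_assoc]

theorem pvFeas_mono (s : List (Int × Int)) : ∀ {v v' : Int}, v ≤ v' → pvFeas v s = true → pvFeas v' s = true := by
  induction s with
  | nil => intro v v' _ _; rfl
  | cons x s ih =>
    intro v v' hvv h
    simp only [pvFeas, Bool.and_eq_true, decide_eq_true_eq] at h ⊢
    exact ⟨le_trans h.1 hvv, ih (by omega) h.2⟩

theorem pvPsum_le_filter (s : List (Int × Int)) : pvPsum s ≤ pvPsum (s.filter (fun x => decide (0 < x.2))) := by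
  induction s with
  | nil => simp
  | cons x s ih =>
    by_cases hx : 0 < x.2
    · rw [List.filter_cons_of_pos (by simpa using hx)]; simp only [pvPsum_cons]; omega
    · rw [List.filter_cons_of_neg (by simpa using hx)]; simp only [pvPsum_cons]; omega

theorem pvFeas_filter (s : List (Int × Int)) : ∀ v, pvFeas v s = true → pvFeas v (s.filter (fun x => decide (0 < x.2))) = true := by
  induction s with
  | nil => intro v _; rfl
  | cons x s ih =>
    intro v h
    simp only [pvFeas, Bool.and_eq_true, decide_eq_true_eq] at h
    by_cases hx : 0 < x.2
    · rw [List.filter_cons_of_pos (by simpa using hx)]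
      simp only [pvFeas, Bool.and_eq_true, decide_eq_true_eq]
      exact ⟨h.1, ih _ h.2⟩
    · rw [List.filter_cons_of_neg (by simpa using hx)]
      exact pvFeas_mono _ (by omega) (ih _ h.2)

theorem pvFeas_of_all (s : List (Int × Int)) : ∀ v, (∀ x ∈ s, x.1 ≤ v ∧ 0 < x.2) → pvFeas v s = true := by
  induction s with
  | nil => intro v _; rfl
  | cons x s ih =>
    intro v h
    simp only [pvFeas, Bool.and_eq_true, decide_eq_true_eq]
    refine ⟨(h x (by simp)).1, ih _ (fun y hy => ?_)⟩
    have h1 := h y (by simp [hy])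
    have h2 := (h x (by simp)).2
    exact ⟨by omega, h1.2⟩

theorem pvPsum_nonneg_of_pos (s : List (Int × Int)) (h : ∀ x ∈ s, 0 < x.2) : 0 ≤ pvPsum s := by
  unfold pvPsum
  apply List.sum_nonneg
  intro p hp
  obtain ⟨x, hx, rfl⟩ := List.mem_map.1 hp
  exact le_of_lt (h x hx)

theorem pvM_nil (kk : Nat) (w : Int) : pvM kk w [] = w := by
  refine le_antisymm (pvM_le _ _ _ _ le_rfl ?_) (le_pvM _ _ _)
  intro s hs _ _
  simp [List.sublist_nil.1 hs]

theorem pvM_zero (w : Int) (L : List (Int × Int)) : pvM 0 w L = w := by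
  refine le_antisymm (pvM_le _ _ _ _ le_rfl ?_) (le_pvM _ _ _)
  intro s _ hlen _
  simp [List.length_eq_zero_iff.1 (Nat.le_zero.1 hlen)]

theorem pvM_no_afford (kk : Nat) (w : Int) (L : List (Int × Int))
    (h : ∀ x ∈ L, x.1 ≤ w → x.2 ≤ 0) : pvM kk w L = w := by
  refine le_antisymm (pvM_le _ _ _ _ le_rfl ?_) (le_pvM _ _ _)
  intro s hs _ hf
  have hle := pvPsum_le_filter s
  have hff := pvFeas_filter s w hf
  rcases hfe : s.filter (fun x => decide (0 < x.2)) with _ | ⟨y, t⟩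
  · rw [hfe, pvPsum_nil] at hle; omega
  · exfalso
    rw [hfe] at hff
    simp only [pvFeas, Bool.and_eq_true, decide_eq_true_eq] at hff
    have hy : y ∈ s.filter (fun x => decide (0 < x.2)) := by rw [hfe]; simp
    have hymem := List.mem_of_mem_filter hy
    have hypos : 0 < y.2 := by simpa using (List.mem_filter.1 hy).2
    have := h y (hs.subset hymem) hff.1
    omega

-- DP recurrence for pvM under appending one project at the end
theorem pvM_concat (j : Nat) (w : Int) (L : List (Int × Int)) (c p : Int) :
    pvM (j+1) w (L ++ [(c, p)]) =
      if c ≤ pvM j w L then max (pvM (j+1) w L) (pvM j w L + p) else pvM (j+1) w L := by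
  have hmono : pvM (j+1) w L ≤ pvM (j+1) w (L ++ [(c, p)]) := by
    apply pvM_le _ _ _ _ (le_pvM _ _ _)
    intro s hs hlen hf
    exact pvM_ge _ _ _ s (hs.trans (List.sublist_append_left L _)) hlen hf
  split_ifs with hc
  · apply le_antisymm
    · apply pvM_le _ _ _ _ (le_trans (le_pvM (j+1) w L) (le_max_left _ _))
      intro s hs hlen hf
      rcases List.sublist_append_iff.1 hs with ⟨s1, s2, rfl, h1, h2⟩
      rcases List.sublist_singleton.1 h2 with rfl | rfl
      · rw [List.append_nil] at hf ⊢
        exact le_trans (pvM_ge (j+1) w L s1 h1 (by simpa using hlen) hf) (le_max_left _ _)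
      · rw [pvFeas_append] at hf
        simp only [Bool.and_eq_true] at hf
        have hfs2 : c ≤ w + pvPsum s1 := by
          have := hf.2
          simp only [pvFeas, Bool.and_eq_true, decide_eq_true_eq] at this
          exact this.1
        have hlen1 : s1.length ≤ j := by simp at hlen; omega
        have := pvM_ge j w L s1 h1 hlen1 hf.1
        have hval : w + pvPsum (s1 ++ [(c, p)]) = (w + pvPsum s1) + p := by simp; ring
        rw [hval]
        exact le_trans (by omega) (le_max_right _ _)
    · apply max_le hmono
      obtain ⟨s, hsub, hlen, hf, hM⟩ := pvM_exists j w L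
      have hfs : pvFeas w (s ++ [(c, p)]) = true := by
        rw [pvFeas_append]
        simp only [Bool.and_eq_true]
        refine ⟨hf, ?_⟩
        simp only [pvFeas, Bool.and_eq_true, decide_eq_true_eq]
        exact ⟨by omega, by simp [pvFeas]⟩
      have := pvM_ge (j+1) w (L ++ [(c, p)]) (s ++ [(c, p)])
        (hsub.append (List.Sublist.refl _)) (by simp; omega) hfs
      have hval : w + pvPsum (s ++ [(c, p)]) = (w + pvPsum s) + p := by simp; ring
      omega
  · apply le_antisymm
    · apply pvM_le _ _ _ _ (le_pvM _ _ _)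
      intro s hs hlen hf
      rcases List.sublist_append_iff.1 hs with ⟨s1, s2, rfl, h1, h2⟩
      rcases List.sublist_singleton.1 h2 with rfl | rfl
      · rw [List.append_nil] at hf ⊢
        exact pvM_ge (j+1) w L s1 h1 (by simpa using hlen) hf
      · exfalso
        rw [pvFeas_append] at hf
        simp only [Bool.and_eq_true] at hf
        have hfs2 : c ≤ w + pvPsum s1 := by
          have := hf.2
          simp only [pvFeas, Bool.and_eq_true, decide_eq_true_eq] at this
          exact this.1
        have hlen1 : s1.length ≤ j := by simp at hlen; omega
        have := pvM_ge j w L s1 h1 hlen1 hf.1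
        omega
    · exact hmono

-- sublist of an erase when the element is not in the sublist
theorem pvSublist_erase_of_not_mem (s l : List (Int × Int)) (a : Int × Int)
    (hs : s.Sublist l) (hna : a ∉ s) : s.Sublist (l.erase a) := by
  have := hs.erase a
  rwa [List.erase_of_not_mem hna] at this

-- a feasible selection can be purged of non-positive profits without losing value
theorem pvM_exists_pos (kk : Nat) (w : Int) (L : List (Int × Int)) :
    ∃ s, s.Sublist L ∧ s.length ≤ kk ∧ pvFeas w s = true ∧ (∀ x ∈ s, 0 < x.2) ∧
      pvM kk w L ≤ w + pvPsum s := by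
  obtain ⟨s, hsub, hlen, hf, hM⟩ := pvM_exists kk w L
  refine ⟨s.filter (fun x => decide (0 < x.2)), (List.filter_sublist).trans hsub,
    le_trans (List.length_filter_le _ _) hlen, pvFeas_filter s w hf,
    fun x hx => by simpa using (List.mem_filter.1 hx).2, ?_⟩
  have := pvPsum_le_filter s
  omega

-- greedy exchange: taking the maximal affordable positive profit is optimal
theorem pvM_exchange (j : Nat) (w : Int) (L1 L2 : List (Int × Int)) (cx b : Int)
    (hsort : (L1 ++ (cx, b) :: L2).Pairwise (fun a b => a.1 ≤ b.1))
    (hnotin : (cx, b) ∉ L1)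
    (hcx : cx ≤ w) (hb : 0 < b)
    (hmax : ∀ x ∈ L1 ++ (cx, b) :: L2, x.1 ≤ w → x.2 ≤ b) :
    pvM (j+1) w (L1 ++ (cx, b) :: L2) = pvM j (w + b) (L1 ++ L2) := by
  have hL1cx : ∀ y ∈ L1, y.1 ≤ cx := by
    intro y hy
    exact (List.pairwise_append.1 hsort).2.2 y hy (cx, b) (by simp)
  have herase : (L1 ++ (cx, b) :: L2).erase (cx, b) = L1 ++ L2 := by
    rw [List.erase_append_right _ hnotin, List.erase_cons_head]
  apply le_antisymm
  · -- ≤ : from an optimal selection on the left build one on the right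
    obtain ⟨sp, hspL, hsplen, hspf, hpos, hval⟩ := pvM_exists_pos (j+1) w (L1 ++ (cx, b) :: L2)
    refine le_trans hval ?_
    by_cases hxs : (cx, b) ∈ sp
    · obtain ⟨s1, s2, hn1, hseq, her⟩ := List.exists_erase_eq hxs
      have hsub2 : (s1 ++ s2).Sublist (L1 ++ L2) := by
        rw [← her, ← herase]; exact hspL.erase _
      have hlen2 : (s1 ++ s2).length ≤ j := by
        rw [hseq] at hsplen; simp at hsplen ⊢; omega
      have hfeas2 : pvFeas (w + b) (s1 ++ s2) = true := by
        rw [hseq] at hspf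
        rw [pvFeas_append] at hspf ⊢
        simp only [Bool.and_eq_true] at hspf ⊢
        obtain ⟨hf1, hf2⟩ := hspf
        simp only [pvFeas, Bool.and_eq_true, decide_eq_true_eq] at hf2
        refine ⟨pvFeas_mono _ (by omega) hf1, ?_⟩
        have h3 := hf2.2
        have heq : w + pvPsum s1 + b = w + b + pvPsum s1 := by ring
        rwa [heq] at h3
      have hge := pvM_ge j (w + b) (L1 ++ L2) (s1 ++ s2) hsub2 hlen2 hfeas2
      have hps : pvPsum sp = pvPsum s1 + (b + pvPsum s2) := by rw [hseq]; simp
      simp only [pvPsum_append] at hge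
      omega
    · rcases sp with _ | ⟨y, t⟩
      · have := le_pvM j (w + b) (L1 ++ L2)
        simp only [pvPsum_nil]
        omega
      · simp only [pvFeas, Bool.and_eq_true, decide_eq_true_eq] at hspf
        have hyL : y ∈ L1 ++ (cx, b) :: L2 := hspL.subset (by simp)
        have hyb : y.2 ≤ b := hmax y hyL hspf.1
        have htsub : t.Sublist (L1 ++ L2) := by
          have h1 : t.Sublist (L1 ++ (cx, b) :: L2) := (List.sublist_cons_self y t).trans hspL
          have h2 : (cx, b) ∉ t := fun ht => hxs (by simp [ht])
          have h3 := pvSublist_erase_of_not_mem t _ (cx, b) h1 h2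
          rwa [herase] at h3
        have htf : pvFeas (w + b) t = true := pvFeas_mono t (by omega) hspf.2
        have hge := pvM_ge j (w + b) (L1 ++ L2) t htsub (by simp at hsplen; omega) htf
        simp only [pvPsum_cons]
        omega
  · -- ≥ : from an optimal selection on the right build one on the left
    obtain ⟨tp, htpsub, htplen, htpf, hpos, hval⟩ := pvM_exists_pos j (w + b) (L1 ++ L2)
    refine le_trans hval ?_
    rcases List.sublist_append_iff.1 htpsub with ⟨u, v, huv, hu, hvsub⟩
    subst huv
    have hupos : ∀ x ∈ u, 0 < x.2 := fun x hx => hpos x (List.mem_append.2 (Or.inl hx))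
    have huw : ∀ x ∈ u, x.1 ≤ w := fun x hx => le_trans (hL1cx x (hu.subset hx)) hcx
    have hufeas : pvFeas w u = true := pvFeas_of_all u w (fun x hx => ⟨huw x hx, hupos x hx⟩)
    have hunn : 0 ≤ pvPsum u := pvPsum_nonneg_of_pos u hupos
    have hsfull : (u ++ (cx, b) :: v).Sublist (L1 ++ (cx, b) :: L2) := hu.append (hvsub.cons₂ (cx, b))
    have hlenfull : (u ++ (cx, b) :: v).length ≤ j + 1 := by
      simp at htplen ⊢; omega
    have hffull : pvFeas w (u ++ (cx, b) :: v) = true := by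
      rw [pvFeas_append]
      simp only [Bool.and_eq_true]
      refine ⟨hufeas, ?_⟩
      simp only [pvFeas, Bool.and_eq_true, decide_eq_true_eq]
      refine ⟨by omega, ?_⟩
      rw [pvFeas_append] at htpf
      simp only [Bool.and_eq_true] at htpf
      have h3 := htpf.2
      have heq : w + b + pvPsum u = w + pvPsum u + b := by ring
      rwa [heq] at h3
    have hge := pvM_ge (j+1) w (L1 ++ (cx, b) :: L2) _ hsfull hlenfull hffull
    have hps : pvPsum (u ++ (cx, b) :: v) = pvPsum u + (b + pvPsum v) := by simp
    have hpt : pvPsum (u ++ v) = pvPsum u + pvPsum v := by simp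
    omega

-- max with default over Int lists
theorem pvMaxD_ge (xs : List Int) (y : Int) (hy : y ∈ xs) : y ≤ PySem.List.maxD xs (fun x => x) 0 := by
  unfold PySem.List.maxD
  rcases h : PySem.List.max? xs (fun x => x) with _ | m
  · rw [(PySem.List.max?_eq_none_iff _ _).1 h] at hy; simp at hy
  · exact PySem.List.max?_isMax h y hy

theorem pvMaxD_mem (xs : List Int) (hne : xs ≠ []) : PySem.List.maxD xs (fun x => x) 0 ∈ xs := by
  unfold PySem.List.maxD
  rcases h : PySem.List.max? xs (fun x => x) with _ | m
  · exact absurd ((PySem.List.max?_eq_none_iff _ _).1 h) hne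
  · exact PySem.List.max?_mem h

-- ===== B side: the greedy loop computes pvM =====

theorem pvRefill_eq (projects : List (Int × Int)) (w : Int) : ∀ (i : Nat) (avail : List Int),
    pvRefill projects w i avail =
      (i + ((projects.drop i).takeWhile (fun x => decide (x.1 ≤ w))).length,
       avail ++ ((projects.drop i).takeWhile (fun x => decide (x.1 ≤ w))).map (·.2)) := by
  have main : ∀ (n i : Nat) (avail : List Int), projects.length - i ≤ n →
      pvRefill projects w i avail =
        (i + ((projects.drop i).takeWhile (fun x => decide (x.1 ≤ w))).length,
         avail ++ ((projects.drop i).takeWhile (fun x => decide (x.1 ≤ w))).map (·.2)) := by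
    intro n
    induction n with
    | zero =>
      intro i avail hn
      have hge : projects.length ≤ i := by omega
      have hdrop : projects.drop i = [] := List.drop_eq_nil_of_le hge
      have hpi : projects[i]? = none := List.getElem?_eq_none hge
      rw [pvRefill.eq_def]
      split
      · rename_i cp heq
        rw [hpi] at heq; simp at heq
      · simp [hdrop]
    | succ n ih =>
      intro i avail hn
      rw [pvRefill.eq_def]
      split
      · rename_i cp heq
        obtain ⟨hlt, hget⟩ := List.getElem?_eq_some_iff.1 heq
        have hdrop : projects.drop i = cp :: projects.drop (i+1) := by
          rw [List.drop_eq_getElem_cons hlt, hget]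
        by_cases hc : cp.1 ≤ w
        · rw [if_pos hc, ih (i+1) (avail ++ [cp.2]) (by omega)]
          rw [hdrop, List.takeWhile_cons_of_pos (by simpa using hc)]
          refine Prod.ext ?_ ?_
          · simp; omega
          · simp
        · rw [if_neg hc, hdrop, List.takeWhile_cons_of_neg (by simpa using hc)]
          simp
      · rename_i heq
        have hge : projects.length ≤ i := by
          by_contra hlt
          rw [List.getElem?_eq_getElem (by omega)] at heq; simp at heq
        rw [List.drop_eq_nil_of_le hge]
        simp
  intro i avail
  exact main (projects.length - i) i avail le_rfl

theorem pvDropWhile_unafford (w : Int) (l : List (Int × Int))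
    (hs : l.Pairwise (fun a b => a.1 ≤ b.1)) :
    ∀ x ∈ l.dropWhile (fun y => decide (y.1 ≤ w)), ¬ x.1 ≤ w := by
  induction l with
  | nil => intro x hx; simp at hx
  | cons z l ih =>
    by_cases hz : z.1 ≤ w
    · rw [List.dropWhile_cons_of_pos (by simpa using hz)]
      exact ih (List.pairwise_cons.1 hs).2
    · rw [List.dropWhile_cons_of_neg (by simpa using hz)]
      intro x hx
      rcases List.mem_cons.1 hx with rfl | hx2
      · exact hz
      · have := (List.pairwise_cons.1 hs).1 x hx2
        omega

theorem pvLoopB_eq_M (projects : List (Int × Int))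
    (hs : projects.Pairwise (fun a b => a.1 ≤ b.1)) :
    ∀ (fuel : Nat) (w : Int) (i : Nat) (av : List (Int × Int)),
    (av ++ projects.drop i).Pairwise (fun a b => a.1 ≤ b.1) →
    (∀ x ∈ av, x.1 ≤ w) →
    pvLoopB projects fuel w i (av.map (·.2)) = pvM fuel w (av ++ projects.drop i) := by
  intro fuel
  induction fuel with
  | zero =>
    intro w i av _ _
    simp only [pvLoopB]
    exact (pvM_zero _ _).symm
  | succ f ih =>
    intro w i av hpair hcaps
    simp only [pvLoopB]
    rw [pvRefill_eq]
    have hmap : (av.map (·.2) : List Int) ++ ((projects.drop i).takeWhile (fun x => decide (x.1 ≤ w))).map (·.2)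
        = ((av ++ (projects.drop i).takeWhile (fun x => decide (x.1 ≤ w))).map (·.2)) := (List.map_append ..).symm
    simp only [hmap]
    set T := (projects.drop i).takeWhile (fun x => decide (x.1 ≤ w)) with hT
    set R := (projects.drop i).dropWhile (fun x => decide (x.1 ≤ w)) with hR
    have hsplit : T ++ R = projects.drop i := List.takeWhile_append_dropWhile
    have hPdrop : projects.drop (i + T.length) = R := by
      have h1 : projects.drop (i + T.length) = (projects.drop i).drop T.length := (List.drop_drop).symm
      rw [h1, ← hsplit, List.drop_left]
    have hTw : ∀ x ∈ T, x.1 ≤ w := fun x hx => by simpa using List.mem_takeWhile_imp hx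
    have hcaps2 : ∀ x ∈ av ++ T, x.1 ≤ w := by
      intro x hx; rcases List.mem_append.1 hx with h | h
      exacts [hcaps x h, hTw x h]
    have hpair2 : ((av ++ T) ++ R).Pairwise (fun a b => a.1 ≤ b.1) := by
      rw [List.append_assoc, hsplit]; exact hpair
    have hpairdrop : (projects.drop i).Pairwise (fun a b => a.1 ≤ b.1) := (List.pairwise_append.1 hpair).2.1
    have hRw : ∀ x ∈ R, ¬ x.1 ≤ w := pvDropWhile_unafford w _ hpairdrop
    have hgoalL : av ++ projects.drop i = (av ++ T) ++ R := by
      rw [List.append_assoc, hsplit]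
    set best := PySem.List.maxD ((av ++ T).map (·.2)) (fun x => x) 0 with hbestdef
    by_cases hbest : best ≤ 0
    · rw [if_pos hbest, hgoalL]
      refine (pvM_no_afford _ _ _ ?_).symm
      intro x hx hxw
      rcases List.mem_append.1 hx with h | h
      · have h2 := pvMaxD_ge ((av ++ T).map (·.2)) x.2 (List.mem_map_of_mem h)
        rw [← hbestdef] at h2
        omega
      · exact absurd hxw (hRw x h)
    · rw [if_neg hbest]
      push_neg at hbest
      have hne : ((av ++ T).map (·.2) : List Int) ≠ [] := by
        intro h0
        have : best = 0 := by rw [hbestdef, h0]; rfl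
        omega
      have hbmem : best ∈ (av ++ T).map (·.2) := by
        rw [hbestdef]; exact pvMaxD_mem _ hne
      rw [PySem.List.remove?_eq_some_erase _ _ hbmem, Option.getD_some]
      have hermap : ((av ++ T).map (·.2)).erase best = ((av ++ T).eraseP (fun x => best == x.2)).map (·.2) := by
        rw [List.erase_eq_eraseP, List.eraseP_map]
        rfl
      obtain ⟨x0, hx0mem, hx0p⟩ : ∃ x ∈ av ++ T, (fun x : Int × Int => best == x.2) x = true := by
        obtain ⟨x0, hx0, he⟩ := List.mem_map.1 hbmem
        exact ⟨x0, hx0, by simp [he]⟩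
      obtain ⟨a2, M1, M2, hM1, hpa2, hA2eq, hA2er⟩ := List.exists_of_eraseP (p := fun x : Int × Int => best == x.2) hx0mem hx0p
      have ha2b : a2.2 = best := by
        have := hpa2; simp at this; omega
      have hihpair : ((av ++ T).eraseP (fun x => best == x.2) ++ projects.drop (i + T.length)).Pairwise (fun a b => a.1 ≤ b.1) := by
        rw [hPdrop]
        exact List.Pairwise.sublist ((List.eraseP_sublist).append_right R) hpair2
      have hihcaps : ∀ x ∈ (av ++ T).eraseP (fun x => best == x.2), x.1 ≤ w + best := by
        intro x hx
        have := hcaps2 x (List.eraseP_subset hx)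
        omega
      rw [hermap, ih (w + best) (i + T.length) _ hihpair hihcaps, hPdrop]
      have ha2pair : a2 = (a2.1, best) := by rw [← ha2b]
      have hre : (av ++ T) ++ R = M1 ++ (a2.1, best) :: (M2 ++ R) := by
        rw [hA2eq, ← ha2pair]; simp
      have her2 : (av ++ T).eraseP (fun x => best == x.2) ++ R = M1 ++ (M2 ++ R) := by
        rw [hA2er]; simp
      have hXsort : (M1 ++ (a2.1, best) :: (M2 ++ R)).Pairwise (fun a b => a.1 ≤ b.1) := by
        rw [← hre]; exact hpair2
      have hXnot : (a2.1, best) ∉ M1 := by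
        intro hmem
        have := hM1 _ hmem
        simp at this
      have ha2mem : a2 ∈ av ++ T := by rw [hA2eq]; simp
      have hXcx : a2.1 ≤ w := hcaps2 a2 ha2mem
      have hXmax : ∀ x ∈ M1 ++ (a2.1, best) :: (M2 ++ R), x.1 ≤ w → x.2 ≤ best := by
        intro x hx hxw
        rw [← hre] at hx
        rcases List.mem_append.1 hx with h | h
        · have h2 := pvMaxD_ge ((av ++ T).map (·.2)) x.2 (List.mem_map_of_mem h)
          rw [← hbestdef] at h2
          exact h2
        · exact absurd hxw (hRw x h)
      have hex := pvM_exchange f w M1 (M2 ++ R) a2.1 best hXsort hXnot hXcx hbest hXmax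
      rw [her2, hgoalL, hre, hex]

-- ===== A side: the DP array computes pvM =====

theorem pvInnerA (it : Int × Int) : ∀ (m : Nat) (dp : List Int), m < dp.length →
    ((PySem.List.pyRange (m : Int) 0 (-1)).foldl (fun dp j =>
        if PySem.List.pyGetD dp (j-1) 0 ≥ it.2 then
          PySem.List.pySetD dp j (max (PySem.List.pyGetD dp j 0) (PySem.List.pyGetD dp (j-1) 0 + it.1))
        else dp) dp).length = dp.length ∧
    ∀ t : Nat, PySem.List.pyGetD ((PySem.List.pyRange (m : Int) 0 (-1)).foldl (fun dp j =>
        if PySem.List.pyGetD dp (j-1) 0 ≥ it.2 then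
          PySem.List.pySetD dp j (max (PySem.List.pyGetD dp j 0) (PySem.List.pyGetD dp (j-1) 0 + it.1))
        else dp) dp) (t : Int) 0 =
      if 1 ≤ t ∧ t ≤ m then
        (if PySem.List.pyGetD dp ((t : Int) - 1) 0 ≥ it.2 then
           max (PySem.List.pyGetD dp (t : Int) 0) (PySem.List.pyGetD dp ((t : Int) - 1) 0 + it.1)
         else PySem.List.pyGetD dp (t : Int) 0)
      else PySem.List.pyGetD dp (t : Int) 0 := by
  intro m
  induction m with
  | zero =>
    intro dp _
    rw [show ((0 : Nat) : Int) = 0 by norm_num, PySem.List.pyRange_neg_one_eq_nil le_rfl]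
    refine ⟨rfl, fun t => ?_⟩
    rw [if_neg (show ¬ (1 ≤ t ∧ t ≤ 0) by omega)]
    rfl
  | succ m ih =>
    intro dp hm
    rw [PySem.List.pyRange_neg_one_cons (by exact_mod_cast Nat.succ_pos m),
      show (((m+1 : Nat) : Int) - 1) = ((m : Nat) : Int) by push_cast; ring,
      List.foldl_cons]
    by_cases hcond : PySem.List.pyGetD dp (((m+1 : Nat) : Int) - 1) 0 ≥ it.2
    · rw [if_pos hcond]
      obtain ⟨ihlen, ihget⟩ := ih (PySem.List.pySetD dp ((m+1 : Nat) : Int)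
          (max (PySem.List.pyGetD dp ((m+1 : Nat) : Int) 0) (PySem.List.pyGetD dp (((m+1 : Nat) : Int) - 1) 0 + it.1)))
        (by rw [PySem.List.length_pySetD]; omega)
      have hget' : ∀ t : Nat, PySem.List.pyGetD (PySem.List.pySetD dp ((m+1 : Nat) : Int)
          (max (PySem.List.pyGetD dp ((m+1 : Nat) : Int) 0) (PySem.List.pyGetD dp (((m+1 : Nat) : Int) - 1) 0 + it.1))) (t : Int) 0 =
          if t = m + 1 then (max (PySem.List.pyGetD dp ((m+1 : Nat) : Int) 0) (PySem.List.pyGetD dp (((m+1 : Nat) : Int) - 1) 0 + it.1))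
          else PySem.List.pyGetD dp (t : Int) 0 := by
        intro t
        exact PySem.List.pyGetD_pySetD_natCast dp (m+1) t _ 0 hm
      refine ⟨by rw [ihlen, PySem.List.length_pySetD], fun t => ?_⟩
      rw [ihget t]
      by_cases ht0 : 1 ≤ t
      · by_cases htm : t ≤ m
        · rw [if_pos (show 1 ≤ t ∧ t ≤ m from ⟨ht0, htm⟩),
            if_pos (show 1 ≤ t ∧ t ≤ m + 1 from ⟨ht0, by omega⟩)]
          have e1 : ((t : Nat) : Int) - 1 = (((t - 1 : Nat)) : Int) := by omega
          rw [e1, hget' (t-1), if_neg (show ¬ (t - 1 = m + 1) by omega),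
            hget' t, if_neg (show ¬ (t = m + 1) by omega), ← e1]
        · by_cases htm1 : t = m + 1
          · subst htm1
            rw [if_neg (show ¬ (1 ≤ m + 1 ∧ m + 1 ≤ m) by omega),
              if_pos (show 1 ≤ m + 1 ∧ m + 1 ≤ m + 1 from ⟨ht0, le_rfl⟩),
              if_pos hcond, hget' (m+1), if_pos (show m + 1 = m + 1 from rfl)]
          · rw [if_neg (show ¬ (1 ≤ t ∧ t ≤ m) by omega),
              if_neg (show ¬ (1 ≤ t ∧ t ≤ m + 1) by omega),
              hget' t, if_neg (show ¬ (t = m + 1) from htm1)]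
      · rw [if_neg (show ¬ (1 ≤ t ∧ t ≤ m) by omega),
          if_neg (show ¬ (1 ≤ t ∧ t ≤ m + 1) by omega),
          hget' t, if_neg (show ¬ (t = m + 1) by omega)]
    · rw [if_neg hcond]
      obtain ⟨ihlen, ihget⟩ := ih dp (by omega)
      refine ⟨ihlen, fun t => ?_⟩
      rw [ihget t]
      by_cases ht0 : 1 ≤ t
      · by_cases htm : t ≤ m
        · rw [if_pos (show 1 ≤ t ∧ t ≤ m from ⟨ht0, htm⟩),
            if_pos (show 1 ≤ t ∧ t ≤ m + 1 from ⟨ht0, by omega⟩)]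
        · by_cases htm1 : t = m + 1
          · subst htm1
            rw [if_neg (show ¬ (1 ≤ m + 1 ∧ m + 1 ≤ m) by omega),
              if_pos (show 1 ≤ m + 1 ∧ m + 1 ≤ m + 1 from ⟨ht0, le_rfl⟩), if_neg hcond]
          · rw [if_neg (show ¬ (1 ≤ t ∧ t ≤ m) by omega),
              if_neg (show ¬ (1 ≤ t ∧ t ≤ m + 1) by omega)]
      · rw [if_neg (show ¬ (1 ≤ t ∧ t ≤ m) by omega),
          if_neg (show ¬ (1 ≤ t ∧ t ≤ m + 1) by omega)]

theorem pvFoldA_eq_M (k' : Nat) (w : Int) :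
    ∀ (P : List (Int × Int)) (Q : List (Int × Int)) (dp : List Int),
    dp.length = k' + 1 →
    (∀ j : Nat, j ≤ k' → PySem.List.pyGetD dp (j : Int) 0 = pvM j w Q) →
    (P.foldl (fun dp itm =>
        (PySem.List.pyRange ((k' : Nat) : Int) 0 (-1)).foldl (fun dp j =>
          if PySem.List.pyGetD dp (j-1) 0 ≥ itm.2 then
            PySem.List.pySetD dp j (max (PySem.List.pyGetD dp j 0) (PySem.List.pyGetD dp (j-1) 0 + itm.1))
          else dp) dp) dp).length = k' + 1 ∧
    ∀ j : Nat, j ≤ k' → PySem.List.pyGetD (P.foldl (fun dp itm =>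
        (PySem.List.pyRange ((k' : Nat) : Int) 0 (-1)).foldl (fun dp j =>
          if PySem.List.pyGetD dp (j-1) 0 ≥ itm.2 then
            PySem.List.pySetD dp j (max (PySem.List.pyGetD dp j 0) (PySem.List.pyGetD dp (j-1) 0 + itm.1))
          else dp) dp) dp) (j : Int) 0 = pvM j w (Q ++ P.map Prod.swap) := by
  intro P
  induction P with
  | nil =>
    intro Q dp hlen hget
    refine ⟨hlen, fun j hj => ?_⟩
    simpa using hget j hj
  | cons itm P' ih =>
    intro Q dp hlen hget
    rw [List.foldl_cons]
    obtain ⟨ilen, iget⟩ := pvInnerA itm k' dp (by omega)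
    have hget' : ∀ j : Nat, j ≤ k' →
        PySem.List.pyGetD ((PySem.List.pyRange ((k' : Nat) : Int) 0 (-1)).foldl (fun dp j =>
          if PySem.List.pyGetD dp (j-1) 0 ≥ itm.2 then
            PySem.List.pySetD dp j (max (PySem.List.pyGetD dp j 0) (PySem.List.pyGetD dp (j-1) 0 + itm.1))
          else dp) dp) (j : Int) 0 = pvM j w (Q ++ [itm.swap]) := by
      intro j hj
      rw [iget j]
      rcases j with _ | jj
      · rw [if_neg (show ¬ (1 ≤ 0 ∧ 0 ≤ k') by omega)]
        rw [hget 0 (by omega), pvM_zero, pvM_zero]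
      · rw [if_pos (show 1 ≤ jj + 1 ∧ jj + 1 ≤ k' from ⟨by omega, hj⟩)]
        have e1 : (((jj + 1 : Nat)) : Int) - 1 = ((jj : Nat) : Int) := by omega
        rw [e1, hget jj (by omega), hget (jj+1) hj]
        have hswap : itm.swap = (itm.2, itm.1) := rfl
        rw [hswap, pvM_concat jj w Q itm.2 itm.1]
    obtain ⟨rlen, rget⟩ := ih (Q ++ [itm.swap]) _ (by rw [ilen, hlen]) hget'
    refine ⟨rlen, fun j hj => ?_⟩
    rw [rget j hj]
    simp

-- the two sorts produce swap-related lists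
theorem pvInsertBy_swap (x : Int × Int) : ∀ (ys : List (Int × Int)),
    (PySem.List.insertBy (fun a b => decide (a.2 < b.2)) x ys).map Prod.swap =
      PySem.List.insertBy (fun a b => decide (a.1 < b.1)) x.swap (ys.map Prod.swap) := by
  intro ys
  induction ys with
  | nil => simp [PySem.List.insertBy]
  | cons y ys ih =>
    simp only [PySem.List.insertBy, List.map_cons]
    by_cases h : x.2 < y.2
    · simp [h]
    · simp [h, ih]

theorem pvSorted_swap (profits capital : List Int) :
    (PySem.List.sorted (profits.zip capital) (fun it => it.2)).map Prod.swap =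
      PySem.List.sorted (capital.zip profits) (fun cp => cp.1) := by
  rw [PySem.List.sorted_eq_foldl_insertBy, PySem.List.sorted_eq_foldl_insertBy, ← List.zip_swap]
  suffices h : ∀ (xs acc : List (Int × Int)),
      (xs.foldl (fun acc x => PySem.List.insertBy (fun a b => decide (a.2 < b.2)) x acc) acc).map Prod.swap =
      (xs.map Prod.swap).foldl (fun acc x => PySem.List.insertBy (fun a b => decide (a.1 < b.1)) x acc) (acc.map Prod.swap) by
    simpa using h (profits.zip capital) []
  intro xs
  induction xs with
  | nil => intro acc; simp
  | cons x xs ih =>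
    intro acc
    rw [List.map_cons, List.foldl_cons, List.foldl_cons, ih, pvInsertBy_swap]

theorem pvMain (k : Int) (w : Int) (profits capital : List Int)
    (hk : 0 ≤ k) (hlen : profits.length ≤ capital.length ∨ k = 0) :
    findMaximizedCapital k w profits capital = findMaximizedCapital_alt k w profits capital := by
  rcases hlen with hlen | hk0
  · -- main case: len(profits) ≤ len(capital)
    set k' := k.toNat with hk'
    have hkk : ((k' : Nat) : Int) = k := Int.toNat_of_nonneg hk
    set items := PySem.List.sorted (profits.zip capital) (fun it : Int × Int => it.2) with hitems
    set projects := PySem.List.sorted (capital.zip profits) (fun cp : Int × Int => cp.1) with hprojects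
    have hswapitems : items.map Prod.swap = projects := by
      rw [hitems, hprojects]; exact pvSorted_swap profits capital
    have hlitems : items.length = profits.length := by
      rw [hitems, PySem.List.length_sorted, List.length_zip]; omega
    -- B side
    have hsproj : projects.Pairwise (fun a b => a.1 ≤ b.1) :=
      PySem.List.sorted_pairwise (capital.zip profits) (fun cp : Int × Int => cp.1)
    have hB : findMaximizedCapital_alt k w profits capital = pvM k' w projects := by
      simp only [findMaximizedCapital_alt, ← hprojects, ← hk']
      have h := pvLoopB_eq_M projects hsproj k' w 0 []
        (by simpa using hsproj) (by simp)
      simpa using h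
    -- A side
    have hA : findMaximizedCapital k w profits capital = pvM k' w (items.map Prod.swap) := by
      simp only [findMaximizedCapital, ← hitems]
      rw [show ((profits.length : Nat) : Int) = ((items.length : Nat) : Int) by rw [hlitems]]
      simp only [PySem.List.foldl_pyRange_zero_pyGetD' items ((0 : Int), (0 : Int))
        (fun dp (itm : Int × Int) => (PySem.List.pyRange k 0 (-1)).foldl (fun dp j =>
          if PySem.List.pyGetD dp (j-1) 0 ≥ itm.2 then
            PySem.List.pySetD dp j (max (PySem.List.pyGetD dp j 0) (PySem.List.pyGetD dp (j-1) 0 + itm.1))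
          else dp) dp)]
      rw [show k = ((k' : Nat) : Int) from hkk.symm]
      have hdp0 : ((PySem.List.pyRange 0 (((k' : Nat) : Int) + 1) 1).map (fun _ => w))
          = List.replicate (k' + 1) w := by
        have hc : ((((k' : Nat) : Int) + 1) - 0).toNat = k' + 1 := by omega
        rw [List.map_const', PySem.List.length_pyRange_one, hc]
      rw [hdp0]
      have hdlen : (List.replicate (k' + 1) w).length = k' + 1 := by simp
      have hdget : ∀ j : Nat, j ≤ k' →
          PySem.List.pyGetD (List.replicate (k' + 1) w) (j : Int) 0 = pvM j w [] := by
        intro j hj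
        rw [pvM_nil, PySem.List.pyGetD_natCast, List.getD_eq_getElem?_getD,
          List.getElem?_replicate]
        rw [if_pos (by omega)]
        rfl
      obtain ⟨hrl, hrg⟩ := pvFoldA_eq_M k' w items [] (List.replicate (k' + 1) w) hdlen hdget
      rw [PySem.List.pyGet?_neg_one, List.getLast?_eq_getElem?, hrl, Nat.add_sub_cancel]
      have hfin := hrg k' le_rfl
      rw [PySem.List.pyGetD_natCast, List.getD_eq_getElem?_getD] at hfin
      rw [hfin, List.nil_append]
    rw [hA, hB, hswapitems]
  · -- degenerate case k = 0: A's dp is [w] and both loops do nothing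
    subst hk0
    have hA0 : findMaximizedCapital 0 w profits capital = w := by
      simp only [findMaximizedCapital]
      have h1 : PySem.List.pyRange 0 0 (-1) = [] := PySem.List.pyRange_neg_one_eq_nil le_rfl
      simp only [h1, List.foldl_nil, PySem.List.foldl_ignore]
      have h2 : PySem.List.pyRange 0 (0 + 1) 1 = [0] := by
        rw [PySem.List.pyRange_one]
        simp
      rw [h2]
      simp [PySem.List.pyGet?_neg_one]
    have hB0 : findMaximizedCapital_alt 0 w profits capital = w := by
      simp only [findMaximizedCapital_alt]
      show pvLoopB _ (Int.toNat 0) w 0 [] = w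
      simp only [Int.toNat_zero, pvLoopB]
    rw [hA0, hB0]

-- ===== VERDICT (by name: the statement is the Claim_ definition above) =====
theorem findMaximizedCapital_spec : Claim_equal_findMaximizedCapital := by
  intro k w profits capital _ hpre
  unfold Spec_findMaximizedCapital
  exact pvMain k w profits capital hpre.1 hpre.2
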